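-- pv_equiv track=rewrite | github.com/sfgray26/CBB_Betting | scripts/backfill_positions.py | build_position_flags
-- ===== SOURCE A (Python) =====
-- def build_position_flags(positions: list[str]) -> dict:
--     """Build can_play_* boolean flags from a list of Yahoo position strings."""
--     pos_set = {p.upper() for p in positions if p}
--     return {
--         "can_play_c": "C" in pos_set,
--         "can_play_1b": "1B" in pos_set,
--         "can_play_2b": "2B" in pos_set,
--         "can_play_3b": "3B" in pos_set,
--         "can_play_ss": "SS" in pos_set,
--         "can_play_lf": "LF" in pos_set,
--         "can_play_cf": "CF" in pos_set,
--         "can_play_rf": "RF" in pos_set,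
--         "can_play_of": "OF" in pos_set or bool(pos_set & {"LF", "CF", "RF"}),
--         "can_play_dh": "DH" in pos_set,
--         "can_play_util": "UTIL" in pos_set or "Util" in {p for p in positions if p},
--         "can_play_sp": "SP" in pos_set,
--         "can_play_rp": "RP" in pos_set,
--     }
-- ===== SOURCE B (Python) =====
-- def build_position_flags(positions: list[str]) -> dict:
--     """Build can_play_* boolean flags from a list of Yahoo position strings."""
--     c = b1 = b2 = b3 = ss = lf = cf = rf = of = dh = util = sp = rp = False
--     for p in positions:
--         if not p:
--             continue
--         u = p.upper()
--         if u == "C":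
--             c = True
--         elif u == "1B":
--             b1 = True
--         elif u == "2B":
--             b2 = True
--         elif u == "3B":
--             b3 = True
--         elif u == "SS":
--             ss = True
--         elif u == "LF":
--             lf = True
--             of = True
--         elif u == "CF":
--             cf = True
--             of = True
--         elif u == "RF":
--             rf = True
--             of = True
--         elif u == "OF":
--             of = True
--         elif u == "DH":
--             dh = True
--         elif u == "UTIL":
--             util = True
--         elif u == "SP":
--             sp = True
--         elif u == "RP":
--             rp = True
--     return {
--         "can_play_c": c,
--         "can_play_1b": b1,
--         "can_play_2b": b2,
--         "can_play_3b": b3,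
--         "can_play_ss": ss,
--         "can_play_lf": lf,
--         "can_play_cf": cf,
--         "can_play_rf": rf,
--         "can_play_of": of,
--         "can_play_dh": dh,
--         "can_play_util": util,
--         "can_play_sp": sp,
--         "can_play_rp": rp,
--     }
-- ===== Notes on version B (the rewrite author's own statement) =====
-- stated objective: alternative
-- what changed: Replaces A's set-comprehension plus thirteen membership tests (with a set-intersection OF rollup and a redundant raw 'Util' check) by a single input-driven loop that flips boolean accumulators per position, setting the OF flag directly when LF/CF/RF/OF is seen.
import Mathlib
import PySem

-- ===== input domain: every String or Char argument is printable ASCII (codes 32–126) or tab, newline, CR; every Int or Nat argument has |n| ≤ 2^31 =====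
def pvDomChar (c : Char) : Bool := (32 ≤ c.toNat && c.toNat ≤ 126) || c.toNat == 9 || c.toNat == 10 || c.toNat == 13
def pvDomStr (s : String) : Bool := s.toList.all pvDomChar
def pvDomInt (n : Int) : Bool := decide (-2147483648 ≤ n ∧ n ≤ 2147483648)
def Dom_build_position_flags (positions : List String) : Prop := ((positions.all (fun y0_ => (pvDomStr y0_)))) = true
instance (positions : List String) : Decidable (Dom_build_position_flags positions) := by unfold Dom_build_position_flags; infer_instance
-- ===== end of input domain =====

-- B replaces A's set-comprehension + thirteen membership tests by a single input-driven
-- loop flipping boolean accumulators (OF set directly on LF/CF/RF/OF); alternative, not faster.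


-- ===== PORT A =====
def build_position_flags (positions : List String) : List (String × Bool) :=
  let pos_set : PySem.Set String :=
    PySem.Set.ofList ((positions.filter (fun p => !(p == ""))).map PySem.Str.upper)
  [("can_play_c", pos_set.contains "C"),
   ("can_play_1b", pos_set.contains "1B"),
   ("can_play_2b", pos_set.contains "2B"),
   ("can_play_3b", pos_set.contains "3B"),
   ("can_play_ss", pos_set.contains "SS"),
   ("can_play_lf", pos_set.contains "LF"),
   ("can_play_cf", pos_set.contains "CF"),
   ("can_play_rf", pos_set.contains "RF"),
   ("can_play_of", pos_set.contains "OF" ||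
      !(PySem.Set.inter pos_set (PySem.Set.ofList ["LF", "CF", "RF"])).isEmpty),
   ("can_play_dh", pos_set.contains "DH"),
   ("can_play_util", pos_set.contains "UTIL" ||
      (PySem.Set.ofList (positions.filter (fun p => !(p == "")))).contains "Util"),
   ("can_play_sp", pos_set.contains "SP"),
   ("can_play_rp", pos_set.contains "RP")]

-- ===== PORT B =====
structure PFSt where
  c : Bool
  b1 : Bool
  b2 : Bool
  b3 : Bool
  ss : Bool
  lf : Bool
  cf : Bool
  rf : Bool
  of : Bool
  dh : Bool
  util : Bool
  sp : Bool
  rp : Bool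
deriving DecidableEq, Repr

def pfStep (st : PFSt) (p : String) : PFSt :=
  if p == "" then st
  else
    let u := PySem.Str.upper p
    if u == "C" then { st with c := true }
    else if u == "1B" then { st with b1 := true }
    else if u == "2B" then { st with b2 := true }
    else if u == "3B" then { st with b3 := true }
    else if u == "SS" then { st with ss := true }
    else if u == "LF" then { st with lf := true, of := true }
    else if u == "CF" then { st with cf := true, of := true }
    else if u == "RF" then { st with rf := true, of := true }
    else if u == "OF" then { st with of := true }
    else if u == "DH" then { st with dh := true }
    else if u == "UTIL" then { st with util := true }
    else if u == "SP" then { st with sp := true }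
    else if u == "RP" then { st with rp := true }
    else st

def build_position_flags_alt (positions : List String) : List (String × Bool) :=
  let st := positions.foldl pfStep
    ⟨false, false, false, false, false, false, false, false, false, false, false, false, false⟩
  [("can_play_c", st.c),
   ("can_play_1b", st.b1),
   ("can_play_2b", st.b2),
   ("can_play_3b", st.b3),
   ("can_play_ss", st.ss),
   ("can_play_lf", st.lf),
   ("can_play_cf", st.cf),
   ("can_play_rf", st.rf),
   ("can_play_of", st.of),
   ("can_play_dh", st.dh),
   ("can_play_util", st.util),
   ("can_play_sp", st.sp),
   ("can_play_rp", st.rp)]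

-- ===== PRECONDITION & SPEC =====
def Spec_build_position_flags (positions : List String) (out : List (String × Bool)) : Prop := out = build_position_flags_alt positions
instance (positions : List String) (out : List (String × Bool)) : Decidable (Spec_build_position_flags positions out) := by unfold Spec_build_position_flags; infer_instance

-- ===== CLAIM (what is proved, stated in full; the proofs are below) =====
def Claim_equal_build_position_flags : Prop := ∀ (positions : List String), Dom_build_position_flags positions → Spec_build_position_flags positions (build_position_flags positions)

-- ===== LEMMAS AND PROOFS =====

/-- flag "some nonempty position uppercases to k" -/
def hasPos (l : List String) (k : String) : Bool :=
  l.any (fun p => !(p == "") && (PySem.Str.upper p == k))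

/-- flag "some nonempty position uppercases to one of LF/CF/RF/OF" -/
def hasOF (l : List String) : Bool :=
  l.any (fun p => !(p == "") &&
    ((PySem.Str.upper p == "LF") || (PySem.Str.upper p == "CF") ||
     (PySem.Str.upper p == "RF") || (PySem.Str.upper p == "OF")))

lemma fold_spec (l : List String) (st : PFSt) :
    l.foldl pfStep st =
      ⟨st.c || hasPos l "C", st.b1 || hasPos l "1B", st.b2 || hasPos l "2B",
       st.b3 || hasPos l "3B", st.ss || hasPos l "SS", st.lf || hasPos l "LF",
       st.cf || hasPos l "CF", st.rf || hasPos l "RF", st.of || hasOF l,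
       st.dh || hasPos l "DH", st.util || hasPos l "UTIL", st.sp || hasPos l "SP",
       st.rp || hasPos l "RP"⟩ := by
  induction l generalizing st with
  | nil => simp [hasPos, hasOF]
  | cons p t ih =>
    rw [List.foldl_cons, ih]
    by_cases h0 : p = ""
    · simp [pfStep, hasPos, hasOF, h0]
    · by_cases h1 : PySem.Str.upper p = "C"
      · simp [pfStep, hasPos, hasOF, List.any_cons, h0, h1]
      · by_cases h2 : PySem.Str.upper p = "1B"
        · simp [pfStep, hasPos, hasOF, List.any_cons, h0, h1, h2]
        · by_cases h3 : PySem.Str.upper p = "2B"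
          · simp [pfStep, hasPos, hasOF, List.any_cons, h0, h1, h2, h3]
          · by_cases h4 : PySem.Str.upper p = "3B"
            · simp [pfStep, hasPos, hasOF, List.any_cons, h0, h1, h2, h3, h4]
            · by_cases h5 : PySem.Str.upper p = "SS"
              · simp [pfStep, hasPos, hasOF, List.any_cons, h0, h1, h2, h3, h4, h5]
              · by_cases h6 : PySem.Str.upper p = "LF"
                · simp [pfStep, hasPos, hasOF, List.any_cons, h0, h1, h2, h3, h4, h5, h6]
                · by_cases h7 : PySem.Str.upper p = "CF"
                  · simp [pfStep, hasPos, hasOF, List.any_cons, h0, h1, h2, h3, h4, h5, h6, h7]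
                  · by_cases h8 : PySem.Str.upper p = "RF"
                    · simp [pfStep, hasPos, hasOF, List.any_cons, h0, h1, h2, h3, h4, h5, h6, h7, h8]
                    · by_cases h9 : PySem.Str.upper p = "OF"
                      · simp [pfStep, hasPos, hasOF, List.any_cons, h0, h1, h2, h3, h4, h5, h6, h7, h8, h9]
                      · by_cases h10 : PySem.Str.upper p = "DH"
                        · simp [pfStep, hasPos, hasOF, List.any_cons, h0, h1, h2, h3, h4, h5, h6, h7, h8, h9, h10]
                        · by_cases h11 : PySem.Str.upper p = "UTIL"
                          · simp [pfStep, hasPos, hasOF, List.any_cons, h0, h1, h2, h3, h4, h5, h6, h7, h8, h9, h10, h11]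
                          · by_cases h12 : PySem.Str.upper p = "SP"
                            · simp [pfStep, hasPos, hasOF, List.any_cons, h0, h1, h2, h3, h4, h5, h6, h7, h8, h9, h10, h11, h12]
                            · by_cases h13 : PySem.Str.upper p = "RP"
                              · simp [pfStep, hasPos, hasOF, List.any_cons, h0, h1, h2, h3, h4, h5, h6, h7, h8, h9, h10, h11, h12, h13]
                              · have g0 : (p == "") = false := beq_eq_false_iff_ne.mpr h0
                                have g1 : (PySem.Str.upper p == "C") = false := beq_eq_false_iff_ne.mpr h1
                                have g2 : (PySem.Str.upper p == "1B") = false := beq_eq_false_iff_ne.mpr h2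
                                have g3 : (PySem.Str.upper p == "2B") = false := beq_eq_false_iff_ne.mpr h3
                                have g4 : (PySem.Str.upper p == "3B") = false := beq_eq_false_iff_ne.mpr h4
                                have g5 : (PySem.Str.upper p == "SS") = false := beq_eq_false_iff_ne.mpr h5
                                have g6 : (PySem.Str.upper p == "LF") = false := beq_eq_false_iff_ne.mpr h6
                                have g7 : (PySem.Str.upper p == "CF") = false := beq_eq_false_iff_ne.mpr h7
                                have g8 : (PySem.Str.upper p == "RF") = false := beq_eq_false_iff_ne.mpr h8
                                have g9 : (PySem.Str.upper p == "OF") = false := beq_eq_false_iff_ne.mpr h9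
                                have g10 : (PySem.Str.upper p == "DH") = false := beq_eq_false_iff_ne.mpr h10
                                have g11 : (PySem.Str.upper p == "UTIL") = false := beq_eq_false_iff_ne.mpr h11
                                have g12 : (PySem.Str.upper p == "SP") = false := beq_eq_false_iff_ne.mpr h12
                                have g13 : (PySem.Str.upper p == "RP") = false := beq_eq_false_iff_ne.mpr h13
                                simp [pfStep, hasPos, hasOF, List.any_cons, g0, g1, g2, g3, g4, g5, g6, g7, g8, g9, g10, g11, g12, g13]

lemma contains_upper_set (positions : List String) (k : String) :
    (PySem.Set.ofList ((positions.filter (fun p => !(p == ""))).map PySem.Str.upper)).contains k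
      = hasPos positions k := by
  rw [Bool.eq_iff_iff]
  simp [PySem.Set.contains, PySem.Set.mem_ofList, List.mem_map, List.mem_filter,
    hasPos, List.any_eq_true]
  constructor
  · rintro ⟨p, ⟨hp, hne⟩, hk⟩; exact ⟨p, hp, hne, hk⟩
  · rintro ⟨p, hp, hne, hk⟩; exact ⟨p, ⟨hp, hne⟩, hk⟩

lemma hasPos_iff (l : List String) (k : String) :
    hasPos l k = true ↔ ∃ p ∈ l, ¬p = "" ∧ PySem.Str.upper p = k := by
  simp [hasPos]

lemma hasOF_iff (l : List String) :
    hasOF l = true ↔ ∃ p ∈ l, ¬p = "" ∧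
      (((PySem.Str.upper p = "LF" ∨ PySem.Str.upper p = "CF") ∨ PySem.Str.upper p = "RF") ∨
        PySem.Str.upper p = "OF") := by
  simp [hasOF]

lemma inter3_eq (positions : List String) :
    (!(PySem.Set.inter
        (PySem.Set.ofList ((positions.filter (fun p => !(p == ""))).map PySem.Str.upper))
        (PySem.Set.ofList ["LF", "CF", "RF"])).isEmpty)
      = (hasPos positions "LF" || hasPos positions "CF" || hasPos positions "RF") := by
  have key : ∀ (S T : List String), S.filter (fun x => T.contains x) ≠ [] ↔
      ∃ x ∈ S, T.contains x = true := by
    intro S T; rw [ne_eq, List.filter_eq_nil_iff]; push_neg; simp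
  rw [Bool.eq_iff_iff]
  simp only [Bool.or_eq_true, hasPos_iff]
  constructor
  · intro h
    have hinter : PySem.Set.inter
        (PySem.Set.ofList ((positions.filter (fun p => !(p == ""))).map PySem.Str.upper))
        (PySem.Set.ofList ["LF", "CF", "RF"]) ≠ [] := by
      intro hnil; rw [hnil] at h; simp at h
    obtain ⟨x, hxS, hxT⟩ := (key _ _).mp hinter
    obtain ⟨p, hpf, hup⟩ := List.mem_map.mp ((PySem.Set.mem_ofList _ _).mp hxS)
    obtain ⟨hp, hne'⟩ := List.mem_filter.mp hpf
    have hpe : ¬ p = "" := by simpa using hne'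
    have hx3 : x = "LF" ∨ x = "CF" ∨ x = "RF" := by
      have hmem := List.contains_iff_mem.mp hxT
      simpa [PySem.Set.mem_ofList] using hmem
    rcases hx3 with hx | hx | hx
    · exact Or.inl (Or.inl ⟨p, hp, hpe, by rw [hup, hx]⟩)
    · exact Or.inl (Or.inr ⟨p, hp, hpe, by rw [hup, hx]⟩)
    · exact Or.inr ⟨p, hp, hpe, by rw [hup, hx]⟩
  · intro h
    have hex : ∃ p ∈ positions, ¬p = "" ∧
        (PySem.Str.upper p = "LF" ∨ PySem.Str.upper p = "CF" ∨ PySem.Str.upper p = "RF") := by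
      rcases h with (⟨p, hp, hpe, hup⟩ | ⟨p, hp, hpe, hup⟩) | ⟨p, hp, hpe, hup⟩
      · exact ⟨p, hp, hpe, Or.inl hup⟩
      · exact ⟨p, hp, hpe, Or.inr (Or.inl hup)⟩
      · exact ⟨p, hp, hpe, Or.inr (Or.inr hup)⟩
    obtain ⟨p, hp, hpe, hup3⟩ := hex
    have hmemS : PySem.Str.upper p ∈
        PySem.Set.ofList ((positions.filter (fun p => !(p == ""))).map PySem.Str.upper) :=
      (PySem.Set.mem_ofList _ _).mpr (List.mem_map.mpr
        ⟨p, List.mem_filter.mpr ⟨hp, by simpa using hpe⟩, rfl⟩)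
    have hT : (PySem.Set.ofList ["LF", "CF", "RF"] : List String).contains (PySem.Str.upper p)
        = true := by
      rcases hup3 with h' | h' | h' <;> rw [h'] <;> decide
    have hinter := (key _ _).mpr ⟨_, hmemS, hT⟩
    rcases h' : PySem.Set.inter
        (PySem.Set.ofList ((positions.filter (fun p => !(p == ""))).map PySem.Str.upper))
        (PySem.Set.ofList ["LF", "CF", "RF"]) with _ | ⟨y, ys⟩
    · exact absurd h' hinter
    · simp [h']

lemma of_flag_eq (positions : List String) :
    (hasPos positions "OF" ||
      (hasPos positions "LF" || hasPos positions "CF" || hasPos positions "RF"))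
      = hasOF positions := by
  rw [Bool.eq_iff_iff]
  simp only [Bool.or_eq_true, hasPos_iff, hasOF_iff]
  constructor
  · rintro (⟨p, hp, hpe, h⟩ | (⟨p, hp, hpe, h⟩ | ⟨p, hp, hpe, h⟩) | ⟨p, hp, hpe, h⟩)
    · exact ⟨p, hp, hpe, Or.inr h⟩
    · exact ⟨p, hp, hpe, Or.inl (Or.inl (Or.inl h))⟩
    · exact ⟨p, hp, hpe, Or.inl (Or.inl (Or.inr h))⟩
    · exact ⟨p, hp, hpe, Or.inl (Or.inr h)⟩
  · rintro ⟨p, hp, hpe, ((h | h) | h) | h⟩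
    · exact Or.inr (Or.inl (Or.inl ⟨p, hp, hpe, h⟩))
    · exact Or.inr (Or.inl (Or.inr ⟨p, hp, hpe, h⟩))
    · exact Or.inr (Or.inr ⟨p, hp, hpe, h⟩)
    · exact Or.inl ⟨p, hp, hpe, h⟩

lemma util_flag_eq (positions : List String) :
    (hasPos positions "UTIL" ||
      (PySem.Set.ofList (positions.filter (fun p => !(p == "")))).contains "Util")
      = hasPos positions "UTIL" := by
  cases h : (PySem.Set.ofList (positions.filter (fun p => !(p == "")))).contains "Util" with
  | false => simp
  | true =>
    have hmem : "Util" ∈ positions := by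
      simpa [PySem.Set.contains, PySem.Set.mem_ofList, List.mem_filter] using h
    have hU : hasPos positions "UTIL" = true :=
      (hasPos_iff _ _).mpr ⟨"Util", hmem, by decide, by decide⟩
    simp [hU]

-- ===== VERDICT (by name: the statement is the Claim_ definition above) =====
theorem build_position_flags_spec : Claim_equal_build_position_flags := by
  intro positions _
  unfold Spec_build_position_flags build_position_flags build_position_flags_alt
  rw [fold_spec]
  simp only [Bool.false_or, contains_upper_set, inter3_eq, of_flag_eq, util_flag_eq]
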